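-- pv_equiv track=rewrite | github.com/UchihaSean/Kickstart-Round-E-2018 | MilkTea.py | generate_new_optimal
-- ===== SOURCE A (Python) =====
-- def generate_new_optimal(optimal, change_set):
--     opt = ""
--     for i in range(len(optimal)):
--         if i not in change_set:
--             opt += optimal[i]
--         else:
--             if optimal[i] == '1':
--                 opt += '0'
--             else:
--                 opt += '1'
--     return opt
-- ===== SOURCE B (Python) =====
-- def generate_new_optimal(optimal, change_set):
--     opt = list(optimal)
--     n = len(opt)
--     for i in set(change_set):
--         if 0 <= i < n:
--             opt[i] = '0' if opt[i] == '1' else '1'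
--     return ''.join(opt)
-- ===== Notes on version B (the rewrite author's own statement) =====
-- stated objective: alternative
-- what changed: Instead of scanning every string position and testing membership in change_set at each one, B copies the string into a mutable list and iterates only over the deduplicated change indices, flipping each in-range position in place; it trades the per-position membership test for a per-index bounds check.
import Mathlib
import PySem

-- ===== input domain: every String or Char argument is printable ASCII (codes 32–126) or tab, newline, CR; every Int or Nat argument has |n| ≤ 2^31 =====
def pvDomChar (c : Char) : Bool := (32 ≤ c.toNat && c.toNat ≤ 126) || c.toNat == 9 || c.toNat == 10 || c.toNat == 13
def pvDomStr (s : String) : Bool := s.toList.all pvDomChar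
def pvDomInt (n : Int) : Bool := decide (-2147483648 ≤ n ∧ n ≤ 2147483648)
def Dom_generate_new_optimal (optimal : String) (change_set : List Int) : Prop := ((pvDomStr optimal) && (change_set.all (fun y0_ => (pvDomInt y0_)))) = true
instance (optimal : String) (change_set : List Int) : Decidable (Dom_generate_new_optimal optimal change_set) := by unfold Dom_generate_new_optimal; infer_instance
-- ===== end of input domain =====

-- B iterates only over the deduplicated change indices and flips them in a mutable
-- list, instead of A's scan of every position with a membership test (objective: alternative).

-- ===== PORT A =====
-- A: build the output string left to right over range(len(optimal));
-- keep optimal[i] when i is not in change_set, else append the flipped bit.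
def generate_new_optimal (optimal : String) (change_set : List Int) : String :=
  let chars := optimal.toList
  String.mk ((List.range chars.length).foldl (fun opt (i : Nat) =>
    if ¬ ((i : Int) ∈ change_set) then
      opt ++ [chars.getD i ' ']        -- optimal[i], i always in range here
    else
      if chars.getD i ' ' = '1' then opt ++ ['0'] else opt ++ ['1']) [])

-- ===== PORT B =====
-- B: copy optimal into a list, flip each distinct in-range change index in place.
def generate_new_optimal_alt (optimal : String) (change_set : List Int) : String :=
  let n := optimal.toList.length
  String.mk ((PySem.Set.ofList change_set).foldl (fun opt i =>
    if 0 ≤ i ∧ i < (n : Int) then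
      opt.set i.toNat (if opt.getD i.toNat ' ' = '1' then '0' else '1')
    else opt) optimal.toList)

-- ===== PRECONDITION & SPEC =====
def Spec_generate_new_optimal (optimal : String) (change_set : List Int) (out : String) : Prop := out = generate_new_optimal_alt optimal change_set
instance (optimal : String) (change_set : List Int) (out : String) : Decidable (Spec_generate_new_optimal optimal change_set out) := by unfold Spec_generate_new_optimal; infer_instance

-- ===== CLAIM (what is proved, stated in full; the proofs are below) =====
def Claim_equal_generate_new_optimal : Prop := ∀ (optimal : String) (change_set : List Int), Dom_generate_new_optimal optimal change_set → Spec_generate_new_optimal optimal change_set (generate_new_optimal optimal change_set)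

-- ===== LEMMAS AND PROOFS =====

-- A's loop appends one character per index: it is the map of that character function.
theorem pv_foldl_append_map {α β : Type} (g : β → α) :
    ∀ (l : List β) (init : List α),
      l.foldl (fun acc i => acc ++ [g i]) init = init ++ l.map g := by
  intro l
  induction l with
  | nil => simp
  | cons x xs ih => intro init; simp [List.foldl, ih]

-- B's loop preserves the length of the working list.
theorem pv_foldl_flip_length (n : Nat) :
    ∀ (l : List Int) (acc : List Char),
      (l.foldl (fun opt i =>
        if 0 ≤ i ∧ i < (n : Int) then
          opt.set i.toNat (if opt.getD i.toNat ' ' = '1' then '0' else '1')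
        else opt) acc).length = acc.length := by
  intro l
  induction l with
  | nil => simp
  | cons x xs ih =>
      intro acc
      simp only [List.foldl]
      rw [ih]
      split <;> simp

-- Pointwise description of B's loop on a duplicate-free index list.
theorem pv_foldl_flip_getD (n : Nat) :
    ∀ (l : List Int), l.Nodup → ∀ (acc : List Char), acc.length = n → ∀ (j : Nat), j < n →
      (l.foldl (fun opt i =>
        if 0 ≤ i ∧ i < (n : Int) then
          opt.set i.toNat (if opt.getD i.toNat ' ' = '1' then '0' else '1')
        else opt) acc).getD j ' ' =
      if (j : Int) ∈ l then (if acc.getD j ' ' = '1' then '0' else '1') else acc.getD j ' ' := by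
  intro l
  induction l with
  | nil => intro _ acc _ j _; simp
  | cons x xs ih =>
      intro hnd acc hlen j hj
      obtain ⟨hxnot, hxsnd⟩ := List.nodup_cons.mp hnd
      simp only [List.foldl]
      set acc' := (if 0 ≤ x ∧ x < (n : Int) then
          acc.set x.toNat (if acc.getD x.toNat ' ' = '1' then '0' else '1')
        else acc) with hacc'
      have hlen' : acc'.length = n := by
        rw [hacc']; split <;> simp [hlen]
      rw [ih hxsnd acc' hlen' j hj]
      by_cases hx : (j : Int) = x
      · -- j is the index handled in this step; it cannot recur in xs
        have hjxs : ¬ ((j : Int) ∈ xs) := by rw [hx]; exact hxnot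
        have hmem : (j : Int) ∈ x :: xs := by rw [hx]; exact List.mem_cons_self
        rw [if_neg hjxs, if_pos hmem]
        have hxt : x.toNat = j := by omega
        have hcond : 0 ≤ x ∧ x < (n : Int) := ⟨by omega, by omega⟩
        have hjacc : j < acc.length := by omega
        rw [hacc', if_pos hcond, hxt]
        simp [List.getD_eq_getElem?_getD, List.getElem?_set_self hjacc,
          List.getElem?_eq_getElem hjacc]
      · -- this step does not touch position j
        have hacc'j : acc'.getD j ' ' = acc.getD j ' ' := by
          rw [hacc']
          split
          · have hne : x.toNat ≠ j := by omega
            simp [List.getD_eq_getElem?_getD, List.getElem?_set_ne hne]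
          · rfl
        rw [hacc'j]
        simp [List.mem_cons, hx]

-- ===== VERDICT (by name: the statement is the Claim_ definition above) =====
theorem generate_new_optimal_spec : Claim_equal_generate_new_optimal := by
  intro optimal change_set _
  unfold Spec_generate_new_optimal generate_new_optimal generate_new_optimal_alt
  refine congrArg String.mk ?_
  -- A's loop appends one character per position: rewrite it as a map over range
  have hstep : (fun (opt : List Char) (i : Nat) =>
      if ¬ ((i : Int) ∈ change_set) then
        opt ++ [optimal.toList.getD i ' ']
      else
        if optimal.toList.getD i ' ' = '1' then opt ++ ['0'] else opt ++ ['1']) =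
      (fun (opt : List Char) (i : Nat) => opt ++ [
        if (i : Int) ∈ change_set then
          (if optimal.toList.getD i ' ' = '1' then '0' else '1')
        else optimal.toList.getD i ' ']) := by
    funext opt i
    by_cases h : (i : Int) ∈ change_set
    · simp only [h, not_true, if_false, if_true]; split <;> rfl
    · simp [h]
  rw [hstep, pv_foldl_append_map, List.nil_append]
  -- now compare the map with B's fold, element by element
  have hnd : (PySem.Set.ofList change_set).Nodup := PySem.Set.nodup_ofList change_set
  have hlenB := pv_foldl_flip_length optimal.toList.length
    (PySem.Set.ofList change_set) optimal.toList
  apply List.ext_getElem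
  · simp only [List.length_map, List.length_range, String.length_toList] at hlenB ⊢
    exact hlenB.symm
  · intro j hj1 hj2
    have hjn : j < optimal.toList.length := by simpa using hj1
    have h2 := pv_foldl_flip_getD optimal.toList.length (PySem.Set.ofList change_set) hnd
      optimal.toList rfl j hjn
    simp only [PySem.Set.mem_ofList] at h2
    rw [List.getD_eq_getElem?_getD, List.getElem?_eq_getElem hj2] at h2
    simp only [List.getElem_map, List.getElem_range]
    simpa using h2.symm
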